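-- pv_equiv track=rewrite | github.com/tigantic/physics-os | tests/test_parallel.py | decompose_domain_1d
-- ===== SOURCE A (Python) =====
-- from typing import Callable, Dict, List, Optional, Tuple
--
-- def decompose_domain_1d(
--     n: int,
--     num_parts: int,
-- ) -> List[Tuple[int, int]]:
--     """Decompose 1D domain into parts."""
--     chunk_size = n // num_parts
--     remainder = n % num_parts
--
--     parts = []
--     start = 0
--     for i in range(num_parts):
--         size = chunk_size + (1 if i < remainder else 0)
--         parts.append((start, start + size))
--         start += size
--
--     return parts
-- ===== SOURCE B (Python) =====
-- from typing import List, Tuple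
--
-- def decompose_domain_1d(
--     n: int,
--     num_parts: int,
-- ) -> List[Tuple[int, int]]:
--     """Decompose 1D domain into parts (closed-form boundaries, no running start)."""
--     chunk_size = n // num_parts
--     remainder = n % num_parts
--
--     def boundary(i: int) -> int:
--         return i * chunk_size + min(i, remainder)
--
--     return [(boundary(i), boundary(i + 1)) for i in range(num_parts)]
-- ===== Notes on version B (the rewrite author's own statement) =====
-- stated objective: alternative
-- what changed: Replaced the sequential accumulator loop (running start pointer) with a closed-form boundary function b(i)=i*chunk+min(i,remainder), computing each part's endpoints independently.
import Mathlib
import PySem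

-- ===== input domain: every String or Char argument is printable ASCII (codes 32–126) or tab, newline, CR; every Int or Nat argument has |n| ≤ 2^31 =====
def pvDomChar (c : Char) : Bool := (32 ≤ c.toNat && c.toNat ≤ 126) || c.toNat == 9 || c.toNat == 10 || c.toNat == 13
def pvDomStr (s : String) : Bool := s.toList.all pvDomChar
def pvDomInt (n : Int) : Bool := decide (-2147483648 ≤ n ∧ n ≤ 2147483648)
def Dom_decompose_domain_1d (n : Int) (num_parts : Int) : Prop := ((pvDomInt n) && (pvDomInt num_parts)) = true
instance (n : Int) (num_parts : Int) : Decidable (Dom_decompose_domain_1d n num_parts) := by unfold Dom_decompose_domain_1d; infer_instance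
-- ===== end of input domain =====

-- B replaces A's running-start accumulator loop by a closed-form boundary formula
-- b(i) = i*chunk + min(i, remainder); endpoints are computed independently (objective: alternative).

-- ===== PORT A =====
def decompose_domain_1d (n : Int) (num_parts : Int) : List (Int × Int) :=
  let chunk_size := PySem.Int.floordiv n num_parts
  let remainder := PySem.Int.mod n num_parts
  let st :=
    (PySem.List.pyRange 0 num_parts 1).foldl
      (fun (st : List (Int × Int) × Int) i =>
        let size := chunk_size + (if i < remainder then 1 else 0)
        (st.1 ++ [(st.2, st.2 + size)], st.2 + size))
      ([], 0)
  st.1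

-- ===== PORT B =====
def decompose_domain_1d_alt (n : Int) (num_parts : Int) : List (Int × Int) :=
  let chunk_size := PySem.Int.floordiv n num_parts
  let remainder := PySem.Int.mod n num_parts
  let boundary := fun (i : Int) => i * chunk_size + min i remainder
  (PySem.List.pyRange 0 num_parts 1).map (fun i => (boundary i, boundary (i + 1)))

-- ===== PRECONDITION & SPEC =====
-- Pre_ excludes num_parts = 0, where Python A raises ZeroDivisionError.
def Pre_decompose_domain_1d (n : Int) (num_parts : Int) : Prop := num_parts ≠ 0
instance (n : Int) (num_parts : Int) : Decidable (Pre_decompose_domain_1d n num_parts) := by unfold Pre_decompose_domain_1d; infer_instance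
def pvWitness_decompose_domain_1d : Int × Int := (10, 3)

def Spec_decompose_domain_1d (n : Int) (num_parts : Int) (out : List (Int × Int)) : Prop := out = decompose_domain_1d_alt n num_parts
instance (n : Int) (num_parts : Int) (out : List (Int × Int)) : Decidable (Spec_decompose_domain_1d n num_parts out) := by unfold Spec_decompose_domain_1d; infer_instance

-- ===== CLAIM (what is proved, stated in full; the proofs are below) =====
def Claim_equal_decompose_domain_1d : Prop := ∀ (n : Int) (num_parts : Int), Dom_decompose_domain_1d n num_parts → Pre_decompose_domain_1d n num_parts → Spec_decompose_domain_1d n num_parts (decompose_domain_1d n num_parts)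

-- ===== LEMMAS AND PROOFS =====

-- Loop invariant: folding A's body over range(0, k) yields B's mapped boundaries
-- together with the running start b(k), provided the remainder is nonnegative.
theorem decompose_fold_eq (chunk rem : Int) (hrem : 0 ≤ rem) (k : Nat) :
    (PySem.List.pyRange 0 (k : Int) 1).foldl
        (fun (st : List (Int × Int) × Int) i =>
          (st.1 ++ [(st.2, st.2 + (chunk + if i < rem then 1 else 0))],
           st.2 + (chunk + if i < rem then 1 else 0)))
        ([], 0)
      = ((PySem.List.pyRange 0 (k : Int) 1).map
          (fun i => (i * chunk + min i rem, (i + 1) * chunk + min (i + 1) rem)),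
         (k : Int) * chunk + min (k : Int) rem) := by
  induction k with
  | zero =>
      simp [PySem.List.pyRange_one_eq_nil (by omega : (0:Int) ≤ 0)]
      omega
  | succ k ih =>
      have hcast : ((k + 1 : Nat) : Int) = (k : Int) + 1 := by push_cast; ring
      rw [hcast, PySem.List.pyRange_one_succ_right (by positivity), List.foldl_append, ih,
          List.map_append]
      simp only [List.foldl_cons, List.foldl_nil, List.map_cons, List.map_nil, Prod.mk.injEq]
      by_cases h : (k : Int) < rem
      · have h1 : min ((k:Int)+1) rem = (k:Int)+1 := by omega
        have h2 : min (k:Int) rem = (k:Int) := by omega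
        simp only [h, if_pos, h1, h2, List.append_cancel_left_eq, List.cons.injEq, Prod.mk.injEq]
        and_intros <;> first | trivial | ring
      · have h1 : min ((k:Int)+1) rem = rem := by omega
        have h2 : min (k:Int) rem = rem := by omega
        simp only [h, if_false, h1, h2, List.append_cancel_left_eq, List.cons.injEq,
          Prod.mk.injEq]
        and_intros <;> first | trivial | ring
-- ===== VERDICT (by name: the statement is the Claim_ definition above) =====
theorem decompose_domain_1d_spec : Claim_equal_decompose_domain_1d := by
  intro n num_parts _ hpre
  unfold Spec_decompose_domain_1d
  simp only [decompose_domain_1d, decompose_domain_1d_alt]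
  by_cases hp : 0 < num_parts
  · obtain ⟨k, rfl⟩ : ∃ k : Nat, num_parts = (k : Int) := ⟨num_parts.toNat, by omega⟩
    have hrem := PySem.Int.mod_nonneg n (b := (k : Int)) hp
    rw [decompose_fold_eq _ _ hrem]
  · rw [PySem.List.pyRange_one_eq_nil (by omega)]
    simp
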